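-- pv_equiv track=rewrite | github.com/909ma/Repository-for-Study | 프로그래머스/python/공 던지기.py | solution
-- ===== SOURCE A (Python) =====
-- def solution(numbers, k):
--     size = len(numbers)
--     i = 0
--     for _ in range(k - 1):
--         i += 2
--         if i >= size:
--             i -= size
--     answer = numbers[i]
--     return answer
-- ===== SOURCE B (Python) =====
-- def solution(numbers, k):
--     return numbers[2 * (k - 1) % len(numbers)]
-- ===== Notes on version B (the rewrite author's own statement) =====
-- stated objective: faster
-- what changed: Replaces the O(k) 'add 2, wrap by subtracting size' loop with a single closed-form index 2*(k-1) % len(numbers).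
-- outside the precondition, e.g. on solution([10, 20, 30], 0): A returns 10, B returns 20
import Mathlib
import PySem

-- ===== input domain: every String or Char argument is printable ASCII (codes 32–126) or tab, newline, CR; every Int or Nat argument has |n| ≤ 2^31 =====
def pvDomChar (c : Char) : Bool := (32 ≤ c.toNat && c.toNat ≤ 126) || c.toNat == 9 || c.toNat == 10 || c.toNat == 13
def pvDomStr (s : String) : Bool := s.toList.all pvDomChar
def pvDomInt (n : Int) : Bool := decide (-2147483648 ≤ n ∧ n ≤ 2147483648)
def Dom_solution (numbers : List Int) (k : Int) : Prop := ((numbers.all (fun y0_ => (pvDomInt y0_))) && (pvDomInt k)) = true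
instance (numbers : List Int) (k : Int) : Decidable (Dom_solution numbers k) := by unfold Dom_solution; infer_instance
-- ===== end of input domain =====

-- B replaces A's O(k) "add 2 and wrap" loop by the closed-form index 2*(k-1) % len(numbers) (O(1)).


-- ===== PORT A =====
-- i += 2; if i >= size: i -= size   (the loop body, shared with the proof below)
def stepA (size i : Int) : Int :=
  let i := i + 2
  if i ≥ size then i - size else i

def solution (numbers : List Int) (k : Int) : Int :=
  let size : Int := numbers.length
  let i := (PySem.List.pyRange 0 (k - 1) 1).foldl (fun i _ => stepA size i) 0
  (PySem.List.pyGet? numbers i).getD 0   -- numbers[i]; none (IndexError) excluded by Pre_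

-- ===== PORT B =====
def solution_alt (numbers : List Int) (k : Int) : Int :=
  (PySem.List.pyGet? numbers (PySem.Int.mod (2 * (k - 1)) numbers.length)).getD 0

-- ===== PRECONDITION & SPEC =====
-- Pre_ excludes: inputs where A raises IndexError (empty list; one-element list with k ≥ 2), and the
-- corner k ≤ 0 where A's loop never runs and it accidentally returns numbers[0] — a throw count below 1
-- is outside the problem's 1-based domain and B's modular index is as defensible there as A's 0.
def Pre_solution (numbers : List Int) (k : Int) : Prop :=
  1 ≤ k ∧ 1 ≤ (numbers.length : Int) ∧ (k = 1 ∨ 2 ≤ (numbers.length : Int))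
instance (numbers : List Int) (k : Int) : Decidable (Pre_solution numbers k) := by
  unfold Pre_solution; infer_instance
def pvWitness_solution : List Int × Int := ([1, 2, 3], 2)

def Spec_solution (numbers : List Int) (k : Int) (out : Int) : Prop := out = solution_alt numbers k
instance (numbers : List Int) (k : Int) (out : Int) : Decidable (Spec_solution numbers k out) := by
  unfold Spec_solution; infer_instance

-- ===== CLAIM (what is proved, stated in full; the proofs are below) =====
def Claim_equal_solution : Prop := ∀ (numbers : List Int) (k : Int), Dom_solution numbers k → Pre_solution numbers k → Spec_solution numbers k (solution numbers k)
-- ===== LEMMAS AND PROOFS =====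

-- A's loop over any list, started at a reduced index i, ends at (i + 2*len) mod size.
theorem loop_emod (size : Int) (hs : 2 ≤ size) :
    ∀ (l : List Int) (i : Int), 0 ≤ i → i < size →
      l.foldl (fun i _ => stepA size i) i = (i + 2 * l.length) % size := by
  intro l
  induction l with
  | nil =>
      intro i h0 h1
      simp [Int.emod_eq_of_lt h0 h1]
  | cons x l ih =>
      intro i h0 h1
      have hstep : stepA size i = if size ≤ i + 2 then i + 2 - size else i + 2 := by
        simp [stepA, ge_iff_le]
      rw [List.foldl_cons]
      show List.foldl (fun i _ => stepA size i) (stepA size i) l = _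
      rw [hstep]
      by_cases h : size ≤ i + 2
      · rw [if_pos h, ih _ (by omega) (by omega)]
        have e : i + 2 - size + 2 * (l.length : Int) =
            (i + 2 * ((x :: l).length : Int)) - size := by
          push_cast [List.length_cons]; ring
        rw [e, Int.sub_emod_right]
      · rw [if_neg h, ih _ (by omega) (by omega)]
        congr 1
        push_cast [List.length_cons]; ring

theorem solution_eq_alt (numbers : List Int) (k : Int) (h : Pre_solution numbers k) :
    solution numbers k = solution_alt numbers k := by
  obtain ⟨hk, hlen, hor⟩ := h
  unfold solution solution_alt
  rcases hor with hk1 | hs2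
  · subst hk1
    simp [PySem.Int.mod_eq_emod_of_pos (by omega : (0:Int) < (numbers.length : Int))]
  · dsimp only
    rw [loop_emod (numbers.length : Int) hs2 _ 0 le_rfl (by omega),
      PySem.List.length_pyRange_one,
      PySem.Int.mod_eq_emod_of_pos (by omega : (0:Int) < (numbers.length : Int))]
    have e : (0:Int) + 2 * (((k - 1) - 0).toNat : Int) = 2 * (k - 1) := by omega
    rw [e]

-- ===== VERDICT (by name: the statement is the Claim_ definition above) =====
theorem solution_spec : Claim_equal_solution := by
  intro numbers k _ hpre
  exact solution_eq_alt numbers k hpre
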